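-- pv_equiv track=rewrite | github.com/Praveen10/problemSolving | scandaroon.py | scandaroon_behaviour
-- ===== SOURCE A (Python) =====
-- def scandaroon_behaviour(initial_brashness, actions, echo_threshold):
--     brashnessLevel = {
--         "flap": 2,
--         "squawk": 3,
--         "rest": -1,
--         "peck": -2
--     }
--
--     for i in actions:
--         if i in brashnessLevel:
--             initial_brashness += brashnessLevel[i]
--
--     return initial_brashness >= echo_threshold
-- ===== SOURCE B (Python) =====
-- def scandaroon_behaviour(initial_brashness, actions, echo_threshold):
--     # Sort the actions, then sweep once over the sorted list grouping equal
--     # runs, adding weight * run_length per group (sort-then-group-runs).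
--     weight = {"flap": 2, "squawk": 3, "rest": -1, "peck": -2}
--     total = initial_brashness
--     run = None
--     count = 0
--     for a in sorted(actions):
--         if a == run:
--             count += 1
--         else:
--             if run is not None:
--                 total += weight.get(run, 0) * count
--             run, count = a, 1
--     if run is not None:
--         total += weight.get(run, 0) * count
--     return total >= echo_threshold
-- ===== Notes on version B (the rewrite author's own statement) =====
-- stated objective: alternative
-- what changed: B sorts the actions and sweeps the sorted list once grouping equal runs, adding weight * run-length per group, instead of A's per-element dict-membership + accumulate loop; correct because the total is a sum of per-element weights, which is invariant under reordering and under grouping equal elements.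
import Mathlib
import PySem

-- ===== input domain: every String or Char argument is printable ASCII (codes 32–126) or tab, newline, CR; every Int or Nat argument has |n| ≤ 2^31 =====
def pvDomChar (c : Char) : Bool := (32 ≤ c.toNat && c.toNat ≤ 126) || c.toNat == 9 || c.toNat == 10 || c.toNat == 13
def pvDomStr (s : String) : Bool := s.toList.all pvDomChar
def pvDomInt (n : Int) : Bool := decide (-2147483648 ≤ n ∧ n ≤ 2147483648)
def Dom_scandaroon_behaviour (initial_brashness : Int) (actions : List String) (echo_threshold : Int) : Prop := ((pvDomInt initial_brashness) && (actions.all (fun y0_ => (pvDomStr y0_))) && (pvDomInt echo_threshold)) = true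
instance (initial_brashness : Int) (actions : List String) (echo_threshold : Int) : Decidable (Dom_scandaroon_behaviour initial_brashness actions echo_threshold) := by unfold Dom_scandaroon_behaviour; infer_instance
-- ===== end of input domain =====

-- B sorts the actions and sweeps once over the sorted list grouping equal runs,
-- adding weight * run-length per group, instead of A's per-element lookup loop
-- (objective: alternative algorithm; correct since the total is order-invariant).

-- ===== PORT A =====
def scandaroonDict : PySem.Dict String Int :=
  PySem.Dict.mk [("flap", 2), ("squawk", 3), ("rest", -1), ("peck", -2)]

def scandaroon_behaviour (initial_brashness : Int) (actions : List String) (echo_threshold : Int) : Bool :=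
  let final := actions.foldl (fun acc i =>
    match PySem.Dict.get? scandaroonDict i with
    | some v => acc + v
    | none => acc) initial_brashness
  decide (final ≥ echo_threshold)

-- ===== PORT B =====
def scandaroonWeight : PySem.Dict String Int :=
  PySem.Dict.mk [("flap", 2), ("squawk", 3), ("rest", -1), ("peck", -2)]

-- one step of Source B's run-grouping sweep; state = (total, run, count)
def scandaroonStep (st : Int × Option String × Int) (a : String) : Int × Option String × Int :=
  match st with
  | (total, run, count) =>
    if some a = run then (total, run, count + 1)
    else
      match run with
      | some r => (total + PySem.Dict.getD scandaroonWeight r 0 * count, some a, 1)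
      | none   => (total, some a, 1)

def scandaroon_behaviour_alt (initial_brashness : Int) (actions : List String) (echo_threshold : Int) : Bool :=
  let st := (PySem.List.sorted actions (fun x => x) false).foldl scandaroonStep
              (initial_brashness, none, 0)
  let total := match st.2.1 with
    | some r => st.1 + PySem.Dict.getD scandaroonWeight r 0 * st.2.2
    | none   => st.1
  decide (total ≥ echo_threshold)

-- ===== PRECONDITION & SPEC =====
def Spec_scandaroon_behaviour (initial_brashness : Int) (actions : List String) (echo_threshold : Int) (out : Bool) : Prop := out = scandaroon_behaviour_alt initial_brashness actions echo_threshold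
instance (initial_brashness : Int) (actions : List String) (echo_threshold : Int) (out : Bool) : Decidable (Spec_scandaroon_behaviour initial_brashness actions echo_threshold out) := by unfold Spec_scandaroon_behaviour; infer_instance

-- ===== CLAIM =====
def Claim_equal_scandaroon_behaviour : Prop := ∀ (initial_brashness : Int) (actions : List String) (echo_threshold : Int), Dom_scandaroon_behaviour initial_brashness actions echo_threshold → Spec_scandaroon_behaviour initial_brashness actions echo_threshold (scandaroon_behaviour initial_brashness actions echo_threshold)

-- ===== LEMMAS AND PROOFS =====

-- per-action weight (0 for unknown actions)
def scandaroonW (a : String) : Int := PySem.Dict.getD scandaroonWeight a 0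

-- flushing the pending run into the total ("finalize" of Source B's state)
def scandaroonFin (st : Int × Option String × Int) : Int :=
  match st.2.1 with
  | some r => st.1 + scandaroonW r * st.2.2
  | none   => st.1

-- one step of the sweep adds exactly the element's weight to the finalized total
theorem scandaroonFin_step (st : Int × Option String × Int) (a : String) :
    scandaroonFin (scandaroonStep st a) = scandaroonFin st + scandaroonW a := by
  obtain ⟨t, r, c⟩ := st
  by_cases h : some a = r
  · subst h
    simp [scandaroonStep, scandaroonFin, scandaroonW]; ring
  · cases r with
    | none => simp [scandaroonStep, scandaroonFin, h]
    | some r' => simp [scandaroonStep, scandaroonFin, h, scandaroonW]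

-- B's fold: finalized total = start + sum of per-element weights
theorem scandaroonFin_foldl (l : List String) (st : Int × Option String × Int) :
    scandaroonFin (l.foldl scandaroonStep st) = scandaroonFin st + (l.map scandaroonW).sum := by
  induction l generalizing st with
  | nil => simp
  | cons a l ih =>
    simp only [List.foldl_cons, ih, scandaroonFin_step, List.map_cons, List.sum_cons]
    ring

-- A's fold = start + sum of per-element weights
theorem scandaroonA_foldl (l : List String) (ib : Int) :
    l.foldl (fun acc i =>
      match PySem.Dict.get? scandaroonDict i with
      | some v => acc + v
      | none => acc) ib = ib + (l.map scandaroonW).sum := by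
  induction l generalizing ib with
  | nil => simp
  | cons a l ih =>
    simp only [List.foldl_cons, ih, List.map_cons, List.sum_cons]
    have hd : scandaroonDict = scandaroonWeight := rfl
    cases h : PySem.Dict.get? scandaroonDict a with
    | none => simp [scandaroonW, PySem.Dict.getD, ← hd, h]
    | some v => simp [scandaroonW, PySem.Dict.getD, ← hd, h]; ring

-- ===== VERDICT =====
theorem scandaroon_behaviour_spec : Claim_equal_scandaroon_behaviour := by
  intro ib actions et _
  unfold Spec_scandaroon_behaviour scandaroon_behaviour scandaroon_behaviour_alt
  have hperm : ((PySem.List.sorted actions (fun x => x) false).map scandaroonW).Perm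
      (actions.map scandaroonW) :=
    (PySem.List.sorted_perm actions (fun x => x) false).map scandaroonW
  have hB := scandaroonFin_foldl (PySem.List.sorted actions (fun x => x) false) (ib, none, 0)
  simp only [scandaroonA_foldl]
  simp only [scandaroonFin] at hB
  rw [show ((PySem.List.sorted actions (fun x => x) false).map scandaroonW).sum
        = (actions.map scandaroonW).sum from hperm.sum_eq] at hB
  -- rewrite B's body via hB
  simp only [scandaroonW] at hB
  rw [hB]
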